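-- pv_equiv track=rewrite | github.com/lionlai1989/data-structures-and-algorithms | AlgorithmicToolbox/02_different_summands.py | optimal_summands
-- ===== SOURCE A (Python) =====
-- def optimal_summands(n):
-- 	k = n
-- 	l = 1
-- 	summands = []
-- 	while True:
-- 		if k > 2*l:
-- 			summands.append(l)
-- 			k = k - l
-- 			l = l + 1
-- 		else:
-- 			summands.append(k)
-- 			break
--
-- 	return summands
-- ===== SOURCE B (Python) =====
-- import math
--
-- def optimal_summands(n):
--     if n < 1:
--         return [n]
--     k = (math.isqrt(8 * n + 1) - 1) // 2  # largest k with k*(k+1)/2 <= n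
--     return list(range(1, k)) + [n - (k - 1) * k // 2]
-- ===== Notes on version B (the rewrite author's own statement) =====
-- stated objective: alternative
-- what changed: Replaces the greedy append-one-summand-at-a-time loop with a closed form: the summand count k is computed directly via math.isqrt, and the result is list(range(1,k)) plus the remainder as the last summand.
import Mathlib
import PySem

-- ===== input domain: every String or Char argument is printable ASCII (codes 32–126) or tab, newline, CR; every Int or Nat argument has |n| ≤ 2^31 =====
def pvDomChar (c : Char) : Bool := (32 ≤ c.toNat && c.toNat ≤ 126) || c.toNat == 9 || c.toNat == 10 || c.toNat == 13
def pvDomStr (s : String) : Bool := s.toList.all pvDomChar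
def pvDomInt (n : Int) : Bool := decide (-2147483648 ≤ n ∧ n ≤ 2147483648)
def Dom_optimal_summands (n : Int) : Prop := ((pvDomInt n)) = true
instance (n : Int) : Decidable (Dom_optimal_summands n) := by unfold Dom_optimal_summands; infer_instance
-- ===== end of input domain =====

-- B replaces A's greedy while-loop by a closed form: the summand count k from an integer
-- square root, then range(1,k) plus the remainder as the last summand (objective: alternative).


-- ===== PORT A =====
-- A's 'while True' loop as fuel recursion; the fuel n.toNat + 1 bounds the iteration
-- count (each taken branch decreases k by l ≥ 1 before k ≤ 2*l stops the loop), so the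
-- fuel-exhausted base case is never reached (proved inside optimal_summands_spec).
def pvLoopA (fuel : Nat) (k l : Int) (summands : List Int) : List Int :=
  match fuel with
  | 0 => summands
  | fuel + 1 =>
    if k > 2 * l then pvLoopA fuel (k - l) (l + 1) (summands ++ [l])
    else summands ++ [k]

def optimal_summands (n : Int) : List Int :=
  pvLoopA (n.toNat + 1) n 1 []

-- ===== PORT B =====
-- math.isqrt(m) is ported by hand as Nat.sqrt on m.toNat — exact here because B only
-- reaches it with 8*n+1 ≥ 9 (the n < 1 branch returned first).
def optimal_summands_alt (n : Int) : List Int :=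
  if n < 1 then [n]
  else
    let k : Int := ((Nat.sqrt (8 * n + 1).toNat : Int) - 1) / 2
    PySem.List.pyRange 1 k 1 ++ [n - (k - 1) * k / 2]

-- ===== PRECONDITION & SPEC =====
def Spec_optimal_summands (n : Int) (out : List Int) : Prop := out = optimal_summands_alt n
instance (n : Int) (out : List Int) : Decidable (Spec_optimal_summands n out) := by unfold Spec_optimal_summands; infer_instance

-- ===== CLAIM (what is proved, stated in full; the proofs are below) =====
def Claim_equal_optimal_summands : Prop := ∀ (n : Int), Dom_optimal_summands n → Spec_optimal_summands n (optimal_summands n)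

-- ===== LEMMAS AND PROOFS =====

-- (m-1)*m is even, so halving it as Int floor-division is exact.
lemma pv_two_mul_pred_half (m : Int) : 2 * ((m - 1) * m / 2) = (m - 1) * m := by
  rcases Int.even_or_odd m with ⟨t, ht⟩ | ⟨t, ht⟩
  · subst ht
    have : (t + t - 1) * (t + t) = 2 * ((t + t - 1) * t) := by ring
    rw [this, Int.mul_ediv_cancel_left _ (by norm_num)]
  · subst ht
    have : (2 * t + 1 - 1) * (2 * t + 1) = 2 * (t * (2 * t + 1)) := by ring
    rw [this, Int.mul_ediv_cancel_left _ (by norm_num)]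

-- B's k brackets 2*n: k*(k+1) ≤ 2*n < (k+1)*(k+2), and 1 ≤ k, for n ≥ 1.
lemma pv_sqrt_bracket (n : Int) (h1 : 1 ≤ n) :
    1 ≤ ((Nat.sqrt (8 * n + 1).toNat : Int) - 1) / 2 ∧
    (((Nat.sqrt (8 * n + 1).toNat : Int) - 1) / 2) * ((((Nat.sqrt (8 * n + 1).toNat : Int) - 1) / 2) + 1) ≤ 2 * n ∧
    2 * n < ((((Nat.sqrt (8 * n + 1).toNat : Int) - 1) / 2) + 1) * ((((Nat.sqrt (8 * n + 1).toNat : Int) - 1) / 2) + 2) := by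
  set s : Nat := Nat.sqrt (8 * n + 1).toNat with hs
  have hm : ((8 * n + 1).toNat : Int) = 8 * n + 1 := by omega
  have hlo : (s : Int) * s ≤ 8 * n + 1 := by
    have h : ((s * s : Nat) : Int) ≤ 8 * n + 1 := by
      rw [← hm]
      have h0 : s * s ≤ (8 * n + 1).toNat := by
        simpa [pow_two, hs] using Nat.sqrt_le' (8 * n + 1).toNat
      exact_mod_cast h0
    push_cast at h; exact h
  have hhi : 8 * n + 1 < ((s : Int) + 1) * ((s : Int) + 1) := by
    have h : ((8 * n + 1).toNat : Int) < (((s + 1) * (s + 1) : Nat) : Int) := by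
      have h0 : (8 * n + 1).toNat < (s + 1) * (s + 1) := by
        simpa [pow_two, hs, Nat.succ_eq_add_one] using Nat.lt_succ_sqrt' (8 * n + 1).toNat
      exact_mod_cast h0
    rw [hm] at h; push_cast at h; exact h
  have hs3 : 3 ≤ (s : Int) := by
    have : 3 ≤ s := by
      have : 3 * 3 ≤ (8 * n + 1).toNat := by omega
      exact (Nat.le_sqrt'.mpr this)
    exact_mod_cast this
  set K : Int := ((s : Int) - 1) / 2 with hK
  have hcase : (s : Int) = 2 * K + 1 ∨ (s : Int) = 2 * K + 2 := by omega
  rcases hcase with hc | hc <;>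
    refine ⟨by omega, by nlinarith, by nlinarith⟩

-- Loop invariant: from state (k, l) with 2*k = 2*n - (l-1)*l and 1 ≤ l ≤ K, where K
-- brackets 2*n, the loop emits l, l+1, …, K-1 and finally n - (K-1)*K/2.
lemma pv_loopA_spec (n K : Int)
    (hK1 : K * (K + 1) ≤ 2 * n) (hK2 : 2 * n < (K + 1) * (K + 2)) :
    ∀ (d fuel : Nat) (l k : Int) (acc : List Int),
    1 ≤ l → l ≤ K → 2 * k = 2 * n - (l - 1) * l → (K - l).toNat = d → d < fuel →
    pvLoopA fuel k l acc = acc ++ PySem.List.pyRange l K 1 ++ [n - (K - 1) * K / 2] := by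
  intro d
  induction d with
  | zero =>
    intro fuel l k acc hl hlK hk hd hfuel
    obtain ⟨f, rfl⟩ : ∃ f, fuel = f + 1 := ⟨fuel - 1, by omega⟩
    have hlK' : l = K := by omega
    subst hlK'
    have hstop : ¬ (k > 2 * l) := by nlinarith
    have hlast : k = n - (l - 1) * l / 2 := by
      have := pv_two_mul_pred_half l; omega
    simp only [pvLoopA]
    rw [if_neg hstop, PySem.List.pyRange_one_eq_nil (le_refl l), hlast]
    simp
  | succ d ih =>
    intro fuel l k acc hl hlK hk hd hfuel
    obtain ⟨f, rfl⟩ : ∃ f, fuel = f + 1 := ⟨fuel - 1, by omega⟩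
    have hlt : l < K := by omega
    have hgo : k > 2 * l := by nlinarith
    have hrec : 2 * (k - l) = 2 * n - ((l + 1) - 1) * (l + 1) := by
      have : ((l + 1) - 1) * (l + 1) = (l - 1) * l + 2 * l := by ring
      omega
    have := ih f (l + 1) (k - l) (acc ++ [l]) (by omega) (by omega) hrec (by omega) (by omega)
    simp only [pvLoopA, if_pos hgo, this, PySem.List.pyRange_one_cons hlt]
    simp

-- ===== VERDICT (by name: the statement is the Claim_ definition above) =====
theorem optimal_summands_spec : Claim_equal_optimal_summands := by
  intro n _
  unfold Spec_optimal_summands optimal_summands optimal_summands_alt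
  by_cases hn : n < 1
  · have hstop : ¬ (n > 2 * 1) := by omega
    simp only [pvLoopA]
    rw [if_neg hstop, if_pos hn]
    simp
  · rw [not_lt] at hn
    obtain ⟨hK0, hK1, hK2⟩ := pv_sqrt_bracket n hn
    set K : Int := ((Nat.sqrt (8 * n + 1).toNat : Int) - 1) / 2 with hK
    have hKn : K ≤ n := by nlinarith
    have := pv_loopA_spec n K hK1 hK2 (K - 1).toNat (n.toNat + 1) 1 n []
      (le_refl 1) hK0 (by ring_nf) rfl (by omega)
    rw [this]
    simp [if_neg (by omega : ¬ n < 1)]
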